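-- pv_equiv track=rewrite | github.com/Maneeshamuthyalapalli/TheHive | Alternate Seating.py | can_seat_people
-- ===== SOURCE A (Python) =====
-- def can_seat_people(N, M, seats):
--     i = 0
--     count = 0
--     while i < M:
--         if seats[i] == 0:
--             if (i == 0 or seats[i - 1] == 0) and (i == M-1 or seats[i+1] == 0):
--                 count += 1
--                 i += 2
--             else:
--                 i += 1
--         else:
--             i += 1
--     return "YES" if count >= N else "NO"
-- ===== SOURCE B (Python) =====
-- def can_seat_people(N, M, seats):
--     total = 0
--     l = 0
--     while l < M:
--         if seats[l] != 0:
--             l += 1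
--             continue
--         r = l
--         while r + 1 < M and seats[r + 1] == 0:
--             r += 1
--         s = l if l == 0 else l + 1
--         e = r if r == M - 1 else r - 1
--         if s <= e:
--             total += (e - s) // 2 + 1
--         l = r + 1
--     return "YES" if total >= N else "NO"
-- ===== Notes on version B (the rewrite author's own statement) =====
-- stated objective: alternative
-- what changed: A steps index-by-index through every seat with a greedy place-and-skip-2 walk; B segments the row into maximal zero-runs in one pass and adds a closed-form count per run (run length and whether each end is the array boundary or an occupied seat).
import Mathlib
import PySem

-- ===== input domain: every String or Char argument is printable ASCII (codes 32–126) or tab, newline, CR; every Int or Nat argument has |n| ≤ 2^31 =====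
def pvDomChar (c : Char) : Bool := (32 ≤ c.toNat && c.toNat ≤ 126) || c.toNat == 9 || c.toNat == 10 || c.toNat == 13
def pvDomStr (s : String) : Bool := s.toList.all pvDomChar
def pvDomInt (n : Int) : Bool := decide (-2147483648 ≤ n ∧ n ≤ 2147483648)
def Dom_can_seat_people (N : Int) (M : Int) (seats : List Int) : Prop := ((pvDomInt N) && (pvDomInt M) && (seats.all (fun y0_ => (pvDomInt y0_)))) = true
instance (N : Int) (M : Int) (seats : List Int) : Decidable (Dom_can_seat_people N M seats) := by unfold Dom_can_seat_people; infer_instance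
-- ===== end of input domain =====

-- B replaces A's index-by-index greedy stepping with a run-segmentation pass: each maximal
-- zero-run contributes a closed-form count (objective: alternative; same O(M) cost).

-- ===== PORT A =====
-- A's while loop; fuel = M.toNat suffices since i increases by at least 1 each iteration.
-- Indexing via getD at i.toNat: inside Pre_ every access has 0 ≤ index < seats.length, where
-- this is exactly Python's seats[i]; out-of-range access (M > len, IndexError) is excluded by Pre_.
def aLoop (M : Int) (seats : List Int) : Nat → Int → Int → Int
  | 0, _, count => count
  | fuel+1, i, count =>
    if i < M then
      if seats.getD i.toNat 1 = 0 then
        if (i = 0 ∨ seats.getD (i-1).toNat 1 = 0) ∧ (i = M - 1 ∨ seats.getD (i+1).toNat 1 = 0) then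
          aLoop M seats fuel (i+2) (count+1)
        else
          aLoop M seats fuel (i+1) count
      else
        aLoop M seats fuel (i+1) count
    else count

def can_seat_people (N : Int) (M : Int) (seats : List Int) : String :=
  if N ≤ aLoop M seats M.toNat 0 0 then "YES" else "NO"

-- ===== PORT B =====
-- inner while of Source B: extend r while r+1 < M and seats[r+1] == 0
def bRunEnd (M : Int) (seats : List Int) : Nat → Int → Int
  | 0, r => r
  | fuel+1, r =>
    if r + 1 < M ∧ seats.getD (r+1).toNat 1 = 0 then bRunEnd M seats fuel (r+1) else r

def bLoop (M : Int) (seats : List Int) : Nat → Int → Int → Int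
  | 0, _, total => total
  | fuel+1, l, total =>
    if l < M then
      if seats.getD l.toNat 1 ≠ 0 then bLoop M seats fuel (l+1) total
      else
        let r := bRunEnd M seats fuel l
        let s := if l = 0 then l else l + 1
        let e := if r = M - 1 then r else r - 1
        let total' := if s ≤ e then total + PySem.Int.floordiv (e - s) 2 + 1 else total
        bLoop M seats fuel (r+1) total'
    else total

def can_seat_people_alt (N : Int) (M : Int) (seats : List Int) : String :=
  if N ≤ bLoop M seats M.toNat 0 0 then "YES" else "NO"

-- ===== PRECONDITION & SPEC =====
-- Python A raises IndexError exactly when M > len(seats) (the loop reaches index len(seats)).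
def Pre_can_seat_people (N : Int) (M : Int) (seats : List Int) : Prop := M ≤ (seats.length : Int)
instance (N : Int) (M : Int) (seats : List Int) : Decidable (Pre_can_seat_people N M seats) := by unfold Pre_can_seat_people; infer_instance
def pvWitness_can_seat_people : Int × Int × List Int := (1, 3, [0, 0, 0])

def Spec_can_seat_people (N : Int) (M : Int) (seats : List Int) (out : String) : Prop := out = can_seat_people_alt N M seats
instance (N : Int) (M : Int) (seats : List Int) (out : String) : Decidable (Spec_can_seat_people N M seats out) := by unfold Spec_can_seat_people; infer_instance

-- ===== CLAIM (what is proved, stated in full; the proofs are below) =====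
def Claim_equal_can_seat_people : Prop := ∀ (N : Int) (M : Int) (seats : List Int), Dom_can_seat_people N M seats → Pre_can_seat_people N M seats → Spec_can_seat_people N M seats (can_seat_people N M seats)

-- ===== LEMMAS AND PROOFS =====

-- saturated (fuel-free) views of the two loops
def aRun (M : Int) (seats : List Int) (i c : Int) : Int := aLoop M seats (M - i).toNat i c
def bRun (M : Int) (seats : List Int) (l t : Int) : Int := bLoop M seats (M - l).toNat l t
def bEnd (M : Int) (seats : List Int) (r : Int) : Int := bRunEnd M seats (M - 1 - r).toNat r

theorem aLoop_step (M : Int) (seats : List Int) :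
    ∀ (f : Nat) (i c : Int), (M - i).toNat ≤ f → aLoop M seats (f+1) i c = aLoop M seats f i c := by
  intro f
  induction f with
  | zero =>
    intro i c h
    have hi : ¬ i < M := by omega
    simp [aLoop, hi]
  | succ f ih =>
    intro i c h
    by_cases hi : i < M
    · conv_lhs => rw [aLoop]
      conv_rhs => rw [aLoop]
      rw [if_pos hi, if_pos hi]
      split_ifs with h1 h2
      · exact ih _ _ (by omega)
      · exact ih _ _ (by omega)
      · exact ih _ _ (by omega)
    · conv_lhs => rw [aLoop]
      conv_rhs => rw [aLoop]
      rw [if_neg hi, if_neg hi]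

theorem aLoop_eq_aRun (M : Int) (seats : List Int) :
    ∀ (f : Nat) (i c : Int), (M - i).toNat ≤ f → aLoop M seats f i c = aRun M seats i c := by
  intro f
  induction f with
  | zero =>
    intro i c h
    unfold aRun
    rw [show (M - i).toNat = 0 by omega]
  | succ f ih =>
    intro i c h
    rcases Nat.lt_or_ge (M - i).toNat (f+1) with hlt | hge
    · have hf : (M - i).toNat ≤ f := by omega
      rw [aLoop_step M seats f i c hf]
      exact ih i c hf
    · unfold aRun
      rw [show (M - i).toNat = f + 1 by omega]

theorem bRunEnd_step (M : Int) (seats : List Int) :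
    ∀ (f : Nat) (r : Int), (M - 1 - r).toNat ≤ f → bRunEnd M seats (f+1) r = bRunEnd M seats f r := by
  intro f
  induction f with
  | zero =>
    intro r h
    have hr : ¬ (r + 1 < M ∧ seats.getD (r+1).toNat 1 = 0) := by
      rintro ⟨h1, -⟩; omega
    conv_lhs => rw [bRunEnd]
    rw [if_neg hr]
    rfl
  | succ f ih =>
    intro r h
    by_cases hc : r + 1 < M ∧ seats.getD (r+1).toNat 1 = 0
    · conv_lhs => rw [bRunEnd]
      conv_rhs => rw [bRunEnd]
      rw [if_pos hc, if_pos hc]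
      exact ih _ (by omega)
    · conv_lhs => rw [bRunEnd]
      conv_rhs => rw [bRunEnd]
      rw [if_neg hc, if_neg hc]

theorem bRunEnd_eq_bEnd (M : Int) (seats : List Int) :
    ∀ (f : Nat) (r : Int), (M - 1 - r).toNat ≤ f → bRunEnd M seats f r = bEnd M seats r := by
  intro f
  induction f with
  | zero =>
    intro r h
    unfold bEnd
    rw [show (M - 1 - r).toNat = 0 by omega]
  | succ f ih =>
    intro r h
    rcases Nat.lt_or_ge (M - 1 - r).toNat (f+1) with hlt | hge
    · have hf : (M - 1 - r).toNat ≤ f := by omega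
      rw [bRunEnd_step M seats f r hf]
      exact ih r hf
    · unfold bEnd
      rw [show (M - 1 - r).toNat = f + 1 by omega]

theorem bRunEnd_ge (M : Int) (seats : List Int) :
    ∀ (f : Nat) (r : Int), r ≤ bRunEnd M seats f r := by
  intro f
  induction f with
  | zero => intro r; exact le_rfl
  | succ f ih =>
    intro r
    rw [bRunEnd]
    split_ifs with h
    · exact le_trans (by omega) (ih (r+1))
    · exact le_rfl

theorem bEnd_ge (M : Int) (seats : List Int) (r : Int) : r ≤ bEnd M seats r :=
  bRunEnd_ge M seats _ r

theorem bLoop_step (M : Int) (seats : List Int) :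
    ∀ (f : Nat) (l t : Int), (M - l).toNat ≤ f → bLoop M seats (f+1) l t = bLoop M seats f l t := by
  intro f
  induction f with
  | zero =>
    intro l t h
    have hl : ¬ l < M := by omega
    simp [bLoop, hl]
  | succ f ih =>
    intro l t h
    by_cases hl : l < M
    · conv_lhs => rw [bLoop]
      conv_rhs => rw [bLoop]
      rw [if_pos hl, if_pos hl]
      by_cases hz : seats.getD l.toNat 1 ≠ 0
      · rw [if_pos hz, if_pos hz]
        exact ih _ _ (by omega)
      · rw [if_neg hz, if_neg hz]
        rw [bRunEnd_eq_bEnd M seats (f+1) l (by omega), bRunEnd_eq_bEnd M seats f l (by omega)]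
        exact ih (bEnd M seats l + 1)
          (if (if l = 0 then l else l + 1) ≤
              (if bEnd M seats l = M - 1 then bEnd M seats l else bEnd M seats l - 1) then
            t + PySem.Int.floordiv
                ((if bEnd M seats l = M - 1 then bEnd M seats l else bEnd M seats l - 1)
                  - (if l = 0 then l else l + 1)) 2 + 1
          else t)
          (by have := bEnd_ge M seats l; omega)
    · conv_lhs => rw [bLoop]
      conv_rhs => rw [bLoop]
      rw [if_neg hl, if_neg hl]

theorem bLoop_eq_bRun (M : Int) (seats : List Int) :
    ∀ (f : Nat) (l t : Int), (M - l).toNat ≤ f → bLoop M seats f l t = bRun M seats l t := by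
  intro f
  induction f with
  | zero =>
    intro l t h
    unfold bRun
    rw [show (M - l).toNat = 0 by omega]
  | succ f ih =>
    intro l t h
    rcases Nat.lt_or_ge (M - l).toNat (f+1) with hlt | hge
    · have hf : (M - l).toNat ≤ f := by omega
      rw [bLoop_step M seats f l t hf]
      exact ih l t hf
    · unfold bRun
      rw [show (M - l).toNat = f + 1 by omega]

-- one-step unfolding of the saturated loops
theorem aRun_stop (M : Int) (seats : List Int) (i c : Int) (hi : ¬ i < M) :
    aRun M seats i c = c := by
  unfold aRun
  rw [show (M - i).toNat = 0 by omega]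
  rfl

theorem aRun_succ (M : Int) (seats : List Int) (i c : Int) (hi : i < M) :
    aRun M seats i c =
      if seats.getD i.toNat 1 = 0 then
        if (i = 0 ∨ seats.getD (i-1).toNat 1 = 0) ∧ (i = M - 1 ∨ seats.getD (i+1).toNat 1 = 0) then
          aRun M seats (i+2) (c+1)
        else aRun M seats (i+1) c
      else aRun M seats (i+1) c := by
  conv_lhs => unfold aRun
  rw [show (M - i).toNat = ((M - i).toNat - 1) + 1 by omega, aLoop, if_pos hi]
  split_ifs with h1 h2
  · exact aLoop_eq_aRun M seats _ _ _ (by omega)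
  · exact aLoop_eq_aRun M seats _ _ _ (by omega)
  · exact aLoop_eq_aRun M seats _ _ _ (by omega)

theorem bRun_stop (M : Int) (seats : List Int) (l t : Int) (hl : ¬ l < M) :
    bRun M seats l t = t := by
  unfold bRun
  rw [show (M - l).toNat = 0 by omega]
  rfl

theorem bRun_succ (M : Int) (seats : List Int) (l t : Int) (hl : l < M) :
    bRun M seats l t =
      if seats.getD l.toNat 1 ≠ 0 then bRun M seats (l+1) t
      else
        bRun M seats (bEnd M seats l + 1)
          (if (if l = 0 then l else l + 1) ≤
              (if bEnd M seats l = M - 1 then bEnd M seats l else bEnd M seats l - 1) then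
            t + PySem.Int.floordiv
                ((if bEnd M seats l = M - 1 then bEnd M seats l else bEnd M seats l - 1)
                  - (if l = 0 then l else l + 1)) 2 + 1
          else t) := by
  conv_lhs => unfold bRun
  rw [show (M - l).toNat = ((M - l).toNat - 1) + 1 by omega, bLoop, if_pos hl]
  by_cases h1 : seats.getD l.toNat 1 ≠ 0
  · rw [if_pos h1, if_pos h1]
    exact bLoop_eq_bRun M seats _ _ _ (by omega)
  · rw [if_neg h1, if_neg h1]
    rw [bRunEnd_eq_bEnd M seats ((M - l).toNat - 1) l (by omega)]
    exact bLoop_eq_bRun M seats ((M - l).toNat - 1) (bEnd M seats l + 1)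
      (if (if l = 0 then l else l + 1) ≤
          (if bEnd M seats l = M - 1 then bEnd M seats l else bEnd M seats l - 1) then
        t + PySem.Int.floordiv
            ((if bEnd M seats l = M - 1 then bEnd M seats l else bEnd M seats l - 1)
              - (if l = 0 then l else l + 1)) 2 + 1
      else t)
      (by have := bEnd_ge M seats l; omega)

-- properties of the run end found by B's inner loop
theorem bEnd_spec (M : Int) (seats : List Int) :
    ∀ (n : Nat) (r : Int), n = (M - 1 - r).toNat → 0 ≤ r → r < M →
      r ≤ bEnd M seats r ∧ bEnd M seats r < M ∧
      (∀ j, r < j → j ≤ bEnd M seats r → seats.getD j.toNat 1 = 0) ∧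
      (M ≤ bEnd M seats r + 1 ∨ seats.getD (bEnd M seats r + 1).toNat 1 ≠ 0) := by
  intro n
  induction n with
  | zero =>
    intro r hn h0 hr
    have hrM : r = M - 1 := by omega
    unfold bEnd
    rw [← hn]
    exact ⟨le_rfl, hr, fun j h1 h2 => by simp only [bRunEnd] at h2; omega, Or.inl (by simp [bRunEnd]; omega)⟩
  | succ k ih =>
    intro r hn h0 hr
    have hm : M - 1 - r = k + 1 := by omega
    unfold bEnd
    rw [← hn, bRunEnd]
    by_cases hc : r + 1 < M ∧ seats.getD (r+1).toNat 1 = 0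
    · rw [if_pos hc]
      have hk : (k : Nat) = (M - 1 - (r+1)).toNat := by omega
      have hbe : bRunEnd M seats k (r+1) = bEnd M seats (r+1) := by
        unfold bEnd; rw [← hk]
      rw [hbe]
      obtain ⟨ih1, ih2, ih3, ih4⟩ := ih (r+1) hk (by omega) hc.1
      refine ⟨by omega, ih2, ?_, ih4⟩
      intro j hj1 hj2
      by_cases hj : j = r + 1
      · rw [hj]; exact hc.2
      · exact ih3 j (by omega) hj2
    · rw [if_neg hc]
      push_neg at hc
      refine ⟨le_rfl, hr, fun j h1 h2 => by omega, ?_⟩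
      by_cases h2 : r + 1 < M
      · exact Or.inr (hc h2)
      · exact Or.inl (by omega)

-- the greedy walk across one maximal zero-run, entering at a position whose left neighbour is zero
theorem run_inner (M : Int) (seats : List Int) (r : Int) (hr : r < M)
    (hend : M ≤ r + 1 ∨ seats.getD (r+1).toNat 1 ≠ 0) :
    ∀ (n : Nat) (p c : Int), n = (r + 1 - p).toNat → 0 ≤ p → p ≤ r →
      (∀ j, p ≤ j → j ≤ r → seats.getD j.toNat 1 = 0) →
      (p = 0 ∨ seats.getD (p-1).toNat 1 = 0) →
      aRun M seats p c =
        aRun M seats (r+1)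
          (c + (if p ≤ (if r = M - 1 then r else r - 1) then
              PySem.Int.floordiv ((if r = M - 1 then r else r - 1) - p) 2 + 1 else 0)) := by
  intro n
  induction n using Nat.strong_induction_on with
  | _ n ih =>
  intro p c hn h0 hpr hz hleft
  have hpM : p < M := by omega
  have hzp : seats.getD p.toNat 1 = 0 := hz p le_rfl hpr
  rw [aRun_succ M seats p c hpM, if_pos hzp]
  by_cases hplace : p < r ∨ (p = r ∧ r = M - 1)
  · have hcond : (p = 0 ∨ seats.getD (p-1).toNat 1 = 0) ∧ (p = M - 1 ∨ seats.getD (p+1).toNat 1 = 0) := by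
      refine ⟨hleft, ?_⟩
      rcases hplace with h | ⟨h1, h2⟩
      · exact Or.inr (hz (p+1) (by omega) (by omega))
      · exact Or.inl (by omega)
    rw [if_pos hcond]
    by_cases hin : p + 2 ≤ r
    · rw [ih ((r + 1 - (p+2)).toNat) (by omega) (p+2) (c+1) rfl (by omega) hin
          (fun j hj1 hj2 => hz j (by omega) hj2)
          (Or.inr (by rw [show p + 2 - 1 = p + 1 by ring]; exact hz (p+1) (by omega) (by omega)))]
      congr 1
      simp only [PySem.Int.floordiv_eq_ediv_of_pos (show (0:Int) < 2 by norm_num)]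
      split_ifs <;> omega
    · push_neg at hin
      by_cases he : p + 2 = r + 1
      · rw [he]
        congr 1
        simp only [PySem.Int.floordiv_eq_ediv_of_pos (show (0:Int) < 2 by norm_num)]
        split_ifs <;> omega
      · have hpR : p = r := by omega
        have hM : r = M - 1 := by
          rcases hplace with h | ⟨-, h⟩
          · omega
          · exact h
        rw [aRun_stop M seats _ _ (by omega), aRun_stop M seats _ _ (by omega)]
        simp only [PySem.Int.floordiv_eq_ediv_of_pos (show (0:Int) < 2 by norm_num)]
        split_ifs <;> omega
  · push_neg at hplace
    obtain ⟨hp1, hp2⟩ := hplace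
    have hpR : p = r := by omega
    have hRM : r ≠ M - 1 := hp2 hpR
    have hcond : ¬ ((p = 0 ∨ seats.getD (p-1).toNat 1 = 0) ∧ (p = M - 1 ∨ seats.getD (p+1).toNat 1 = 0)) := by
      rintro ⟨-, h2⟩
      rcases h2 with h2 | h2
      · omega
      · rcases hend with h3 | h3
        · omega
        · rw [hpR] at h2; exact h3 h2
    rw [if_neg hcond, show p + 1 = r + 1 by omega]
    congr 1
    simp only [PySem.Int.floordiv_eq_ediv_of_pos (show (0:Int) < 2 by norm_num)]
    split_ifs <;> omega

-- main correspondence: the saturated loops agree from any position B visits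
theorem main_corr (M : Int) (seats : List Int) :
    ∀ (n : Nat) (l c : Int), n = (M - l).toNat → 0 ≤ l →
      (l = 0 ∨ M ≤ l ∨ seats.getD l.toNat 1 ≠ 0 ∨ seats.getD (l-1).toNat 1 ≠ 0) →
      aRun M seats l c = bRun M seats l c := by
  intro n
  induction n using Nat.strong_induction_on with
  | _ n ih =>
  intro l c hn h0 hinv
  by_cases hl : l < M
  · by_cases hz : seats.getD l.toNat 1 = 0
    · -- a zero run starts at l
      have hstart : l = 0 ∨ seats.getD (l-1).toNat 1 ≠ 0 := by
        rcases hinv with h | h | h | h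
        · exact Or.inl h
        · omega
        · exact absurd hz h
        · exact Or.inr h
      obtain ⟨hge, hltM, hzrun, hendp⟩ := bEnd_spec M seats (M - 1 - l).toNat l rfl h0 hl
      set r := bEnd M seats l with hrdef
      rw [bRun_succ M seats l c hl, if_neg (by simpa using hz)]
      have hIH : ∀ t : Int, aRun M seats (r+1) t = bRun M seats (r+1) t := by
        intro t
        exact ih ((M - (r+1)).toNat) (by omega) (r+1) t rfl (by omega)
          (by rcases hendp with h | h
              · exact Or.inr (Or.inl h)
              · refine Or.inr (Or.inr (Or.inl ?_)); exact h)
      rcases hstart with h00 | hne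
      · -- l = 0 : greedy places starting at l itself
        rw [if_pos h00]
        rw [run_inner M seats r hltM hendp ((r + 1 - l).toNat) l c rfl h0 hge
            (fun j hj1 hj2 => by
              by_cases hj : j = l
              · rw [hj]; exact hz
              · exact hzrun j (by omega) hj2)
            (Or.inl h00)]
        rw [hIH]
        congr 1
        split_ifs <;> ring
      · -- l > 0 : greedy skips l (left neighbour occupied) and starts at l+1
        have hl0 : l ≠ 0 := by
          intro h; rw [h] at hne
          -- seats.getD (0-1).toNat 1 ≠ 0 with (0-1).toNat = 0; but seats.getD 0 = 0 from hz
          rw [show ((0:Int) - 1).toNat = 0 by rfl] at hne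
          rw [h] at hz
          exact hne hz
        rw [if_neg hl0]
        rw [aRun_succ M seats l c hl, if_pos hz,
            if_neg (by rintro ⟨h1, -⟩; rcases h1 with h1 | h1; exact hl0 h1; exact hne h1)]
        by_cases hlr : l + 1 ≤ r
        · rw [run_inner M seats r hltM hendp ((r + 1 - (l+1)).toNat) (l+1) c rfl (by omega) hlr
              (fun j hj1 hj2 => hzrun j (by omega) hj2)
              (Or.inr (by rw [show l + 1 - 1 = l by ring]; exact hz))]
          rw [hIH]
          congr 1
          split_ifs <;> ring
        · -- singleton run: l = r, nobody can sit here
          have hlr' : l = r := by omega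
          rw [show l + 1 = r + 1 by omega, hIH]
          congr 1
          rw [if_neg (by split_ifs with h2 <;> omega)]
    · -- occupied seat: both loops just advance
      rw [aRun_succ M seats l c hl, if_neg hz,
          bRun_succ M seats l c hl, if_pos hz]
      exact ih ((M - (l+1)).toNat) (by omega) (l+1) c rfl (by omega)
        (Or.inr (Or.inr (Or.inr (by rw [show l + 1 - 1 = l by ring]; exact hz))))
  · rw [aRun_stop M seats l c hl, bRun_stop M seats l c hl]

-- ===== VERDICT (by name: the statement is the Claim_ definition above) =====
theorem can_seat_people_spec : Claim_equal_can_seat_people := by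
  intro N M seats _ _
  unfold Spec_can_seat_people can_seat_people can_seat_people_alt
  rw [aLoop_eq_aRun M seats M.toNat 0 0 (by omega),
      bLoop_eq_bRun M seats M.toNat 0 0 (by omega),
      main_corr M seats (M - 0).toNat 0 0 rfl le_rfl (Or.inl rfl)]
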